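-- pv_equiv track=rewrite | github.com/ZhouNan1212/LeetCode | Array.py | removeDuplicatesV1
-- ===== SOURCE A (Python) =====
-- def removeDuplicatesV1(nums):
--     """
--     :type nums: List[int]
--     :rtype: int
--     """
--     index = 0
--     while index < len(nums) - 1:
--         if nums[index] == nums[index + 1]:
--             del nums[index + 1]
--         else:
--             index += 1
--     return len(nums)
-- ===== SOURCE B (Python) =====
-- def removeDuplicatesV1(nums):
--     """
--     :type nums: List[int]
--     :rtype: int
--     """
--     if not nums:
--         return 0
--     w = 0
--     for x in nums:
--         if x != nums[w]:
--             w += 1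
--             nums[w] = x
--     del nums[w + 1:]
--     return w + 1
-- ===== Notes on version B (the rewrite author's own statement) =====
-- stated objective: faster
-- what changed: Replaced the while-loop that repeatedly deletes from the list (each del shifts the tail) by a single-pass two-pointer overwrite that writes each new run head forward and truncates once; same in-place final list and return value.
import Mathlib
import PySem

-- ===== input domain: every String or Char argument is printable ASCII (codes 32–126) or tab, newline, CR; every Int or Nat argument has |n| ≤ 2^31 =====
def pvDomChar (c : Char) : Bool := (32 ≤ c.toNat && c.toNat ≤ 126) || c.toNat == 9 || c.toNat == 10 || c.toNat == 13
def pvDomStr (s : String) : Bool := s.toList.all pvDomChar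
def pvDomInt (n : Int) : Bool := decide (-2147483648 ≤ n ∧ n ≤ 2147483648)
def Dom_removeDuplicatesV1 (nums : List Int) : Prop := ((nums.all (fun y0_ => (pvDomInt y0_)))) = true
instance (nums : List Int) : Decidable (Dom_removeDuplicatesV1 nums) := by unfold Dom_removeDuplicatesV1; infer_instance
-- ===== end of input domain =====

-- B replaces A's repeated-del while loop by a one-pass two-pointer overwrite (O(n) instead of
-- O(n^2)); both mutate nums to the same deduplicated list, the equivalence proved is about the
-- return value.


-- ===== PORT A =====
-- while index < len(nums) - 1: if nums[index] == nums[index+1]: del nums[index+1] else: index += 1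
-- index starts at 0 and only grows, so it is kept as a Nat; 'index < len(nums) - 1' (Python int
-- arithmetic) is exactly 'index + 1 < nums.length'; 'del nums[index+1]' is List.eraseIdx.
def removeDuplicatesV1Loop (nums : List Int) (index : Nat) : Int :=
  if _h : index + 1 < nums.length then
    if nums[index]? = nums[index + 1]? then
      removeDuplicatesV1Loop (nums.eraseIdx (index + 1)) index
    else
      removeDuplicatesV1Loop nums (index + 1)
  else
    (nums.length : Int)
termination_by nums.length - index
decreasing_by
  · have := List.length_eraseIdx_of_lt (l := nums) (i := index + 1) (by omega)
    omega
  · omega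

def removeDuplicatesV1 (nums : List Int) : Int :=
  removeDuplicatesV1Loop nums 0

-- ===== PORT B =====
-- if not nums: return 0; w = 0; for x in nums: if x != nums[w]: w += 1; nums[w] = x; return w + 1
-- nums[w] is always the last value written (initially nums[0]), so the fold state is (w, nums[w]);
-- the final 'del nums[w+1:]' does not affect the return value.
def removeDuplicatesV1_alt (nums : List Int) : Int :=
  match nums with
  | [] => 0
  | h :: _ =>
    (nums.foldl (fun (s : Int × Int) x => if x ≠ s.2 then (s.1 + 1, x) else s) (0, h)).1 + 1

-- ===== PRECONDITION & SPEC =====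
def Spec_removeDuplicatesV1 (nums : List Int) (out : Int) : Prop := out = removeDuplicatesV1_alt nums
instance (nums : List Int) (out : Int) : Decidable (Spec_removeDuplicatesV1 nums out) := by unfold Spec_removeDuplicatesV1; infer_instance

-- ===== CLAIM (what is proved, stated in full; the proofs are below) =====
def Claim_equal_removeDuplicatesV1 : Prop := ∀ (nums : List Int), Dom_removeDuplicatesV1 nums → Spec_removeDuplicatesV1 nums (removeDuplicatesV1 nums)

-- ===== LEMMAS AND PROOFS =====

-- Length of the run-deduplicated list: the common value both programs compute.
def dedupLen : List Int → Int
  | [] => 0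
  | [_] => 1
  | a :: b :: t => (if a = b then 0 else 1) + dedupLen (b :: t)

lemma eraseIdx_append_len (pre l : List Int) (k : Nat) :
    (pre ++ l).eraseIdx (pre.length + k) = pre ++ l.eraseIdx k := by
  induction pre with
  | nil => simp
  | cons p ps ih =>
    have h : (p :: ps).length + k = (ps.length + k) + 1 := by simp; omega
    rw [h]
    simpa using ih

lemma loopA_eq (t pre : List Int) (a : Int) :
    removeDuplicatesV1Loop (pre ++ a :: t) pre.length = (pre.length : Int) + dedupLen (a :: t) := by
  induction t generalizing pre a with
  | nil =>
    rw [removeDuplicatesV1Loop]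
    simp [dedupLen]
  | cons b rest ih =>
    rw [removeDuplicatesV1Loop]
    have hlen : pre.length + 1 < (pre ++ a :: b :: rest).length := by simp
    have hga : (pre ++ a :: b :: rest)[pre.length]? = some a := by
      simp
    have hgb : (pre ++ a :: b :: rest)[pre.length + 1]? = some b := by
      have : pre ++ a :: b :: rest = (pre ++ [a]) ++ b :: rest := by simp
      rw [this]
      have hl : pre.length + 1 = (pre ++ [a]).length := by simp
      rw [hl]
      simp
    rw [dif_pos hlen, hga, hgb]
    by_cases hab : a = b
    · rw [if_pos (by rw [hab])]
      have herase : (pre ++ a :: b :: rest).eraseIdx (pre.length + 1) = pre ++ a :: rest := by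
        have h1 : pre ++ a :: b :: rest = (pre ++ [a]) ++ b :: rest := by simp
        have h2 : pre.length + 1 = (pre ++ [a]).length + 0 := by simp
        rw [h1, h2, eraseIdx_append_len]
        simp
      rw [herase, ih pre a, dedupLen, if_pos hab]
      subst hab
      cases rest with
      | nil => simp [dedupLen]
      | cons c cs => simp [dedupLen]
    · rw [if_neg (by simpa using hab)]
      have h1 : pre ++ a :: b :: rest = (pre ++ [a]) ++ b :: rest := by simp
      have h2 : pre.length + 1 = (pre ++ [a]).length := by simp
      rw [h1, h2, ih (pre ++ [a]) b]
      rw [dedupLen, if_neg hab]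
      simp
      ring

lemma loopB_eq (t : List Int) (w last : Int) :
    (t.foldl (fun (s : Int × Int) x => if x ≠ s.2 then (s.1 + 1, x) else s) (w, last)).1 + 1
      = w + dedupLen (last :: t) := by
  induction t generalizing w last with
  | nil => simp [dedupLen]
  | cons b rest ih =>
    simp only [List.foldl_cons]
    by_cases hb : b = last
    · rw [if_neg (by simpa using hb), ih w last]
      rw [dedupLen, if_pos hb.symm]
      subst hb
      ring
    · rw [if_pos (by simpa using hb), ih (w + 1) b]
      rw [dedupLen, if_neg (fun h => hb h.symm)]
      ring

-- ===== VERDICT (by name: the statement is the Claim_ definition above) =====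
theorem removeDuplicatesV1_spec : Claim_equal_removeDuplicatesV1 := by
  intro nums _
  unfold Spec_removeDuplicatesV1 removeDuplicatesV1 removeDuplicatesV1_alt
  cases nums with
  | nil => rw [removeDuplicatesV1Loop]; simp
  | cons h t =>
    have hA := loopA_eq t [] h
    simp only [List.nil_append, List.length_nil] at hA
    rw [hA]
    simp only [List.foldl_cons, if_neg (by simp : ¬ h ≠ h)]
    rw [loopB_eq t 0 h]
    ring
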